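-- pv_equiv track=rewrite | github.com/stefanopalmieri/Kamea | ds_search/categorical_topos.py | check_discoverability
-- ===== SOURCE A (Python) =====
-- def check_discoverability(table):
--     """Check if every non-absorber element is uniquely identifiable."""
--     n = len(table)
--     for x in range(2, n):
--         found = False
--         for d in range(n):
--             if all(table[d][x] != table[d][y] for y in range(2, n) if y != x):
--                 found = True
--                 break
--         if not found:
--             return False
--     return True
-- ===== SOURCE B (Python) =====
-- def check_discoverability(table):
--     """Check if every non-absorber element is uniquely identifiable."""
--     n = len(table)
--     unique_vals = []
--     for row in table:
--         counts = {}
--         for y in range(2, n):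
--             counts[row[y]] = counts.get(row[y], 0) + 1
--         unique_vals.append({v for v, c in counts.items() if c == 1})
--     return all(any(row[x] in uv for row, uv in zip(table, unique_vals))
--                for x in range(2, n))
-- ===== Notes on version B (the rewrite author's own statement) =====
-- stated objective: alternative
-- what changed: Instead of A's per-element search over descriptor rows with an innermost pairwise all-scan, B precomputes per row the set of values occurring exactly once among columns 2..n-1 (one counting dict per row) and declares an element discoverable iff some row maps it into that row's unique-value set. Pre_ excludes ragged tables (more than 2 rows with some row shorter than the number of rows): there A either raises IndexError or returns True only by accident of an early break that never touched the short row, while B's counting pass indexes every row.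
-- outside the precondition, e.g. on check_discoverability([[0], [0], [0]]): A returns True, B raises IndexError
import Mathlib
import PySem

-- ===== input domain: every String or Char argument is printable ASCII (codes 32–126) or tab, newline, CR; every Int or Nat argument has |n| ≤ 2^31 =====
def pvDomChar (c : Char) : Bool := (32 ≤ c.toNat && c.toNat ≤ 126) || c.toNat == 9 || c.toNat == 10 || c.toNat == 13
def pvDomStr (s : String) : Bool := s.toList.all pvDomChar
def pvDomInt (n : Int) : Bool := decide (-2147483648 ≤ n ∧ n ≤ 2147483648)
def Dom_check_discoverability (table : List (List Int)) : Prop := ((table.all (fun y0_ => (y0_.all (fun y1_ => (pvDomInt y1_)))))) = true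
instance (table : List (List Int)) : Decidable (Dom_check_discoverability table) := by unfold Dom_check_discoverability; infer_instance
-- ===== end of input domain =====

-- B builds, per row, the set of values occurring exactly once among columns 2..n-1,
-- replacing A's innermost all-scan by a counting pass (an alternative algorithm).
-- Inside Pre_ every index is in range, so pyGetD with an arbitrary default is exact.

-- ===== PORT A =====
def check_discoverability (table : List (List Int)) : Bool :=
  let n : Int := table.length
  (PySem.List.pyRange 2 n 1).all (fun x =>
    -- 'found = False; for d in ...: if all(...): found = True; break' ≡ any
    (PySem.List.pyRange 0 n 1).any (fun d =>
      ((PySem.List.pyRange 2 n 1).filter (fun y => y ≠ x)).all (fun y =>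
        PySem.List.pyGetD (PySem.List.pyGetD table d []) x 0 ≠
        PySem.List.pyGetD (PySem.List.pyGetD table d []) y 0)))

-- ===== PORT B =====
def check_discoverability_alt (table : List (List Int)) : Bool :=
  let n : Int := table.length
  let unique_vals : List (PySem.Set Int) :=
    table.map (fun row =>
      let counts : PySem.Dict Int Int :=
        (PySem.List.pyRange 2 n 1).foldl
          (fun d y => d.insert (PySem.List.pyGetD row y 0)
                               (d.getD (PySem.List.pyGetD row y 0) 0 + 1))
          PySem.Dict.empty
      PySem.Set.ofList (((counts.items).filter (fun p => p.2 == 1)).map (fun p => p.1)))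
  (PySem.List.pyRange 2 n 1).all (fun x =>
    (table.zip unique_vals).any (fun ru =>
      PySem.Set.contains ru.2 (PySem.List.pyGetD ru.1 x 0)))

-- ===== PRECONDITION & SPEC =====
-- Pre_ excludes ragged tables with more than 2 rows (some row shorter than the number of
-- rows): there Python A either raises IndexError or returns True only because an early
-- break never reached the short row, while B's counting pass indexes every row (IndexError).
def Pre_check_discoverability (table : List (List Int)) : Prop :=
  table.length ≤ 2 ∨ ∀ row ∈ table, table.length ≤ row.length
instance (table : List (List Int)) : Decidable (Pre_check_discoverability table) := by
  unfold Pre_check_discoverability; infer_instance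
def pvWitness_check_discoverability : List (List Int) := [[0, 1, 2], [0, 0, 1], [1, 2, 0]]
def Spec_check_discoverability (table : List (List Int)) (out : Bool) : Prop := out = check_discoverability_alt table
instance (table : List (List Int)) (out : Bool) : Decidable (Spec_check_discoverability table out) := by unfold Spec_check_discoverability; infer_instance

-- ===== CLAIM (what is proved, stated in full; the proofs are below) =====
def Claim_equal_check_discoverability : Prop := ∀ (table : List (List Int)), Dom_check_discoverability table → Pre_check_discoverability table → Spec_check_discoverability table (check_discoverability table)

-- ===== LEMMAS AND PROOFS =====

-- x occurs exactly once among y ∈ R under f iff no other y ∈ R collides with it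
theorem pv_count_one_iff (R : List Int) (hnd : R.Nodup) {x : Int} (hx : x ∈ R)
    (f : Int → Int) :
    (R.map f).count (f x) = 1 ↔ ∀ y ∈ R, y ≠ x → ¬ f x = f y := by
  have hperm : R.Perm (x :: R.erase x) := List.perm_cons_erase hx
  rw [List.count_eq_countP, List.countP_map,
      List.Perm.countP_eq _ hperm, List.countP_cons]
  simp only [Function.comp_def, beq_self_eq_true, if_pos]
  constructor
  · intro h y hy hyx he
    have h0 : List.countP (fun y => f y == f x) (R.erase x) = 0 := by omega
    have := List.countP_eq_zero.1 h0 y ((hnd.mem_erase_iff).2 ⟨hyx, hy⟩)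
    simp only [beq_iff_eq] at this
    exact this he.symm
  · intro h
    have h0 : List.countP (fun y => f y == f x) (R.erase x) = 0 := by
      rw [List.countP_eq_zero]
      intro y hy
      obtain ⟨hyx, hyR⟩ := (hnd.mem_erase_iff).1 hy
      simp only [beq_iff_eq]
      exact fun he => h y hyR hyx he.symm
    omega

-- per row: A's inner all-scan equals membership in B's unique-value set for that row
theorem pv_row_eq (n : Int) (row : List Int) {x : Int}
    (hx : x ∈ PySem.List.pyRange 2 n 1) :
    (((PySem.List.pyRange 2 n 1).filter (fun y => y ≠ x)).all (fun y =>
        PySem.List.pyGetD row x 0 ≠ PySem.List.pyGetD row y 0))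
    = PySem.Set.contains
        (PySem.Set.ofList
          ((((PySem.List.pyRange 2 n 1).foldl
              (fun d y => d.insert (PySem.List.pyGetD row y 0)
                                   (d.getD (PySem.List.pyGetD row y 0) 0 + 1))
              (PySem.Dict.empty : PySem.Dict Int Int)).items.filter (fun p => p.2 == 1)).map (fun p => p.1)))
        (PySem.List.pyGetD row x 0) := by
  have hc : (PySem.List.pyRange 2 n 1).foldl
      (fun d y => d.insert (PySem.List.pyGetD row y 0)
                           (d.getD (PySem.List.pyGetD row y 0) 0 + 1))
      (PySem.Dict.empty : PySem.Dict Int Int)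
      = PySem.Dict.counter ((PySem.List.pyRange 2 n 1).map (fun y => PySem.List.pyGetD row y 0)) := by
    rw [← PySem.Dict.foldl_insert_getD_add_one_eq_counter, List.foldl_map]
  rw [hc, PySem.Dict.items_counter, Bool.eq_iff_iff]
  simp only [List.all_eq_true, List.mem_filter, PySem.Set.contains, List.contains_iff_mem, decide_eq_true_eq]
  rw [PySem.Set.mem_ofList]
  constructor
  · intro h
    have h1 : ((PySem.List.pyRange 2 n 1).map (fun y => PySem.List.pyGetD row y 0)).count
        (PySem.List.pyGetD row x 0) = 1 :=
      (pv_count_one_iff _ (PySem.List.nodup_pyRange_one 2 n) hx (fun y => PySem.List.pyGetD row y 0)).2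
        (fun y hy hyx => h y ⟨hy, by simpa using hyx⟩)
    refine List.mem_map.2 ⟨(PySem.List.pyGetD row x 0, (1 : Int)), ?_, rfl⟩
    rw [List.mem_filter]
    constructor
    · rw [List.mem_map]
      refine ⟨PySem.List.pyGetD row x 0, ?_, by rw [h1]; norm_num⟩
      rw [PySem.Set.mem_ofList]
      exact List.mem_map.2 ⟨x, hx, rfl⟩
    · rfl
  · intro h y hy
    obtain ⟨p, hp, hp1⟩ := List.mem_map.1 h
    rw [List.mem_filter] at hp
    obtain ⟨hpm, hpc⟩ := hp
    obtain ⟨k, hk, hkp⟩ := List.mem_map.1 hpm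
    subst hkp
    simp only at hp1 hpc
    subst hp1
    simp only [beq_iff_eq] at hpc
    have hc1 : ((PySem.List.pyRange 2 n 1).map (fun y => PySem.List.pyGetD row y 0)).count
        (PySem.List.pyGetD row x 0) = 1 := by exact_mod_cast hpc
    obtain ⟨hy1, hy2⟩ := hy
    exact (pv_count_one_iff _ (PySem.List.nodup_pyRange_one 2 n) hx (fun y => PySem.List.pyGetD row y 0)).1 hc1 y hy1 (by simpa using hy2)

-- ===== VERDICT (by name: the statement is the Claim_ definition above) =====
theorem check_discoverability_spec : Claim_equal_check_discoverability := by
  intro table _ _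
  unfold Spec_check_discoverability check_discoverability check_discoverability_alt
  simp only []
  have hzip : table.zip (table.map (fun row =>
      PySem.Set.ofList
        ((((PySem.List.pyRange 2 (table.length : Int) 1).foldl
            (fun d y => d.insert (PySem.List.pyGetD row y 0)
                                 (d.getD (PySem.List.pyGetD row y 0) 0 + 1))
            (PySem.Dict.empty : PySem.Dict Int Int)).items.filter (fun p => p.2 == 1)).map (fun p => p.1))))
      = table.map (fun row => (row,
        PySem.Set.ofList
          ((((PySem.List.pyRange 2 (table.length : Int) 1).foldl
              (fun d y => d.insert (PySem.List.pyGetD row y 0)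
                                   (d.getD (PySem.List.pyGetD row y 0) 0 + 1))
              (PySem.Dict.empty : PySem.Dict Int Int)).items.filter (fun p => p.2 == 1)).map (fun p => p.1)))) := by
    have h := List.zip_map' (f := fun (row : List Int) => row)
      (g := fun row =>
        PySem.Set.ofList
          ((((PySem.List.pyRange 2 (table.length : Int) 1).foldl
              (fun d y => d.insert (PySem.List.pyGetD row y 0)
                                   (d.getD (PySem.List.pyGetD row y 0) 0 + 1))
              (PySem.Dict.empty : PySem.Dict Int Int)).items.filter (fun p => p.2 == 1)).map (fun p => p.1)))
      (l := table)
    simpa using h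
  rw [hzip, Bool.eq_iff_iff]
  simp only [List.all_eq_true]
  refine forall_congr' (fun x => imp_congr_right (fun hx => ?_))
  rw [List.any_map]
  simp only [List.any_eq_true, Function.comp_def]
  constructor
  · rintro ⟨d, hd, hP⟩
    rw [PySem.List.mem_pyRange_one] at hd
    have hdl : d.toNat < table.length := by omega
    refine ⟨table[d.toNat], List.getElem_mem hdl, ?_⟩
    have hrow : PySem.List.pyGetD table d [] = table[d.toNat] :=
      PySem.List.pyGetD_eq_getElem table [] hd.1 (by exact_mod_cast hd.2)
    rw [← hrow, ← pv_row_eq _ _ hx]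
    exact hP
  · rintro ⟨row, hrow, hQ⟩
    obtain ⟨k, hk, hkrow⟩ := List.mem_iff_getElem.1 hrow
    refine ⟨(k : Int), ?_, ?_⟩
    · rw [PySem.List.mem_pyRange_one]
      exact ⟨Int.natCast_nonneg k, by exact_mod_cast hk⟩
    · have hget : PySem.List.pyGetD table (k : Int) [] = row := by
        rw [PySem.List.pyGetD_natCast, List.getD_eq_getElem _ _ hk, hkrow]
      rw [hget, pv_row_eq _ _ hx]
      exact hQ
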